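-- pv_equiv track=rewrite | github.com/Diederik60/CigarBoxAI | scripts/data_preparation_v2.py | _detect_question_patterns
-- ===== SOURCE A (Python) =====
-- from typing import Dict, Any, List, Optional, Tuple
--
-- def _detect_question_patterns(columns: List[str]) -> Dict[str, int]:
--     """Detect common question patterns across any language"""
--     patterns = {
--         "multiple_choice": len([col for col in columns if " - " in col]),
--         "rating_scales": len([col for col in columns if any(word in col.lower()
--                             for word in ["cijfer", "rating", "score", "waardering"])]),
--         "yes_no": len([col for col in columns if any(word in col.lower()
--                       for word in ["ja/nee", "yes/no", "wel/niet"])]),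
--         "open_text": len([col for col in columns if any(word in col.lower()
--                          for word in ["tekst", "opmerking", "comment", "andere"])]),
--         "demographic": len([col for col in columns if any(word in col.lower()
--                            for word in ["geslacht", "leeftijd", "opleiding", "woon"])])
--     }
--     return patterns
-- ===== SOURCE B (Python) =====
-- _CATEGORIES = ["multiple_choice", "rating_scales", "yes_no", "open_text", "demographic"]
--
-- _KEYWORDS = [
--     ("rating_scales", ["cijfer", "rating", "score", "waardering"]),
--     ("yes_no", ["ja/nee", "yes/no", "wel/niet"]),
--     ("open_text", ["tekst", "opmerking", "comment", "andere"]),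
--     ("demographic", ["geslacht", "leeftijd", "opleiding", "woon"]),
-- ]
--
-- def _column_tags(col):
--     """All pattern-category tags a single column matches."""
--     tags = ["multiple_choice"] if " - " in col else []
--     low = col.lower()
--     tags += [cat for cat, words in _KEYWORDS if any(w in low for w in words)]
--     return tags
--
-- def _detect_question_patterns(columns):
--     """Detect common question patterns across any language.
--
--     Tags each column with every category it matches (keyword table),
--     then counts occurrences of each category in the flattened tag list."""
--     tags = [t for col in columns for t in _column_tags(col)]
--     return {cat: tags.count(cat) for cat in _CATEGORIES}
-- ===== Notes on version B (the rewrite author's own statement) =====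
-- stated objective: alternative
-- what changed: Instead of five filtered passes over columns, B uses a keyword table to tag each column with every category it matches, flattens the tags into one list, and builds the result by counting each category in that tag list.
import Mathlib
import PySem

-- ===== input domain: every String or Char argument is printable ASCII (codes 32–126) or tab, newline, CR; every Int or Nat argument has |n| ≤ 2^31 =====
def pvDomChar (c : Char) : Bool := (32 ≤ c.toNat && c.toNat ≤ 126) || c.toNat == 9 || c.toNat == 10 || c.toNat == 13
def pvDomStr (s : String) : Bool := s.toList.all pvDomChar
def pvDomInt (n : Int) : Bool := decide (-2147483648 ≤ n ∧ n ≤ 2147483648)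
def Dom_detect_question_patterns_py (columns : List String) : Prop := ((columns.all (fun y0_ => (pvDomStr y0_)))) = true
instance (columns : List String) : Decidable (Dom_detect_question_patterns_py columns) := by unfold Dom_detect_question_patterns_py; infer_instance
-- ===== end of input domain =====

-- B replaces A's five filtered passes by a keyword-table tagging pass: each column is
-- turned into the list of category tags it matches, the tags are flattened into one list,
-- and the result dict is built by counting each category in that tag list (objective: alternative).

-- ===== PORT A =====
-- literal transliteration: a dict literal whose five values are lengths of filtered lists
def detect_question_patterns_py (columns : List String) : List (String × Int) :=
  [ ("multiple_choice",
      ((columns.filter (fun col => PySem.Str.isIn " - " col)).length : Int)),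
    ("rating_scales",
      ((columns.filter (fun col =>
        (["cijfer", "rating", "score", "waardering"].any
          (fun word => PySem.Str.isIn word (PySem.Str.lower col))))).length : Int)),
    ("yes_no",
      ((columns.filter (fun col =>
        (["ja/nee", "yes/no", "wel/niet"].any
          (fun word => PySem.Str.isIn word (PySem.Str.lower col))))).length : Int)),
    ("open_text",
      ((columns.filter (fun col =>
        (["tekst", "opmerking", "comment", "andere"].any
          (fun word => PySem.Str.isIn word (PySem.Str.lower col))))).length : Int)),
    ("demographic",
      ((columns.filter (fun col =>
        (["geslacht", "leeftijd", "opleiding", "woon"].any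
          (fun word => PySem.Str.isIn word (PySem.Str.lower col))))).length : Int)) ]

-- ===== PORT B =====
def pvCategories : List String :=
  ["multiple_choice", "rating_scales", "yes_no", "open_text", "demographic"]

def pvKeywords : List (String × List String) :=
  [ ("rating_scales", ["cijfer", "rating", "score", "waardering"]),
    ("yes_no", ["ja/nee", "yes/no", "wel/niet"]),
    ("open_text", ["tekst", "opmerking", "comment", "andere"]),
    ("demographic", ["geslacht", "leeftijd", "opleiding", "woon"]) ]

-- _column_tags: every tag a single column matches
def pvColumnTags (col : String) : List String :=
  (if PySem.Str.isIn " - " col then ["multiple_choice"] else []) ++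
  ((pvKeywords.filter (fun p => p.2.any (fun w => PySem.Str.isIn w (PySem.Str.lower col)))).map
    Prod.fst)

def detect_question_patterns_py_alt (columns : List String) : List (String × Int) :=
  let tags := columns.flatMap pvColumnTags
  pvCategories.map (fun cat => (cat, (PySem.List.count tags cat : Int)))

-- ===== PRECONDITION & SPEC =====
def Spec_detect_question_patterns_py (columns : List String) (out : List (String × Int)) : Prop := out = detect_question_patterns_py_alt columns
instance (columns : List String) (out : List (String × Int)) : Decidable (Spec_detect_question_patterns_py columns out) := by unfold Spec_detect_question_patterns_py; infer_instance

-- ===== CLAIM (what is proved, stated in full; the proofs are below) =====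
def Claim_equal_detect_question_patterns_py : Prop := ∀ (columns : List String), Dom_detect_question_patterns_py columns → Spec_detect_question_patterns_py columns (detect_question_patterns_py columns)

-- ===== LEMMAS AND PROOFS =====

-- counting a category in the flattened tag list = length of A's filtered list, provided
-- each column contributes that tag 0/1 times exactly when A's predicate holds
lemma count_flatMap_eq_filter_length (cat : String) (pred : String → Bool)
    (h : ∀ col : String, (pvColumnTags col).count cat = if pred col then 1 else 0) :
    ∀ columns : List String,
      ((columns.flatMap pvColumnTags).count cat : Int) = ((columns.filter pred).length : Int) := by
  intro columns
  induction columns with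
  | nil => simp
  | cons x xs ih =>
    simp only [List.flatMap_cons, List.count_append, List.filter_cons, h x]
    (split <;> simp_all) <;> omega

-- per-column tag counts for each of the five categories
lemma count_tags_mc (col : String) :
    (pvColumnTags col).count "multiple_choice" =
      if PySem.Str.isIn " - " col then 1 else 0 := by
  unfold pvColumnTags pvKeywords
  simp only [List.filter_cons, List.filter_nil]
  split <;> split_ifs <;> simp

lemma count_tags_rs (col : String) :
    (pvColumnTags col).count "rating_scales" =
      if (["cijfer", "rating", "score", "waardering"].any
          (fun word => PySem.Str.isIn word (PySem.Str.lower col))) then 1 else 0 := by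
  unfold pvColumnTags pvKeywords
  simp only [List.filter_cons, List.filter_nil]
  split <;> split_ifs <;> simp

lemma count_tags_yn (col : String) :
    (pvColumnTags col).count "yes_no" =
      if (["ja/nee", "yes/no", "wel/niet"].any
          (fun word => PySem.Str.isIn word (PySem.Str.lower col))) then 1 else 0 := by
  unfold pvColumnTags pvKeywords
  simp only [List.filter_cons, List.filter_nil]
  split <;> split_ifs <;> simp

lemma count_tags_ot (col : String) :
    (pvColumnTags col).count "open_text" =
      if (["tekst", "opmerking", "comment", "andere"].any
          (fun word => PySem.Str.isIn word (PySem.Str.lower col))) then 1 else 0 := by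
  unfold pvColumnTags pvKeywords
  simp only [List.filter_cons, List.filter_nil]
  split <;> split_ifs <;> simp

lemma count_tags_dg (col : String) :
    (pvColumnTags col).count "demographic" =
      if (["geslacht", "leeftijd", "opleiding", "woon"].any
          (fun word => PySem.Str.isIn word (PySem.Str.lower col))) then 1 else 0 := by
  unfold pvColumnTags pvKeywords
  simp only [List.filter_cons, List.filter_nil]
  split <;> split_ifs <;> simp

-- ===== VERDICT (by name: the statement is the Claim_ definition above) =====
theorem detect_question_patterns_py_spec : Claim_equal_detect_question_patterns_py := by
  intro columns _
  unfold Spec_detect_question_patterns_py detect_question_patterns_py detect_question_patterns_py_alt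
  simp only [pvCategories, List.map, PySem.List.count_eq]
  rw [count_flatMap_eq_filter_length _ _ count_tags_mc,
      count_flatMap_eq_filter_length _ _ count_tags_rs,
      count_flatMap_eq_filter_length _ _ count_tags_yn,
      count_flatMap_eq_filter_length _ _ count_tags_ot,
      count_flatMap_eq_filter_length _ _ count_tags_dg]
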